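-- pv_equiv track=rewrite | github.com/tlittle2/Python | Kattis/SoftPasswords/soft.py | reverseCase
-- ===== SOURCE A (Python) =====
-- from string import ascii_lowercase
-- from string import ascii_uppercase
--
-- def reverseCase(s,p):
--     newString = ""
--     for i in p:
--         if i in ascii_lowercase:
--             newString += i.upper()
--         elif i in ascii_uppercase:
--             newString+= i.lower()
--         else:
--             newString+=i
--
--     if newString == s:
--         return True
-- ===== SOURCE B (Python) =====
-- def reverseCase(s, p):
--     # Compare in place, character by character: no transformed string is built.
--     # A character matches when it is the ASCII case-swap of its counterpart,
--     # decided by ordinal arithmetic instead of alphabet membership scans.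
--     if len(s) == len(p):
--         i = 0
--         while i < len(p):
--             o = ord(p[i])
--             if 97 <= o <= 122:
--                 c = chr(o - 32)
--             elif 65 <= o <= 90:
--                 c = chr(o + 32)
--             else:
--                 c = p[i]
--             if c != s[i]:
--                 return None
--             i += 1
--         return True
-- ===== Notes on version B (the rewrite author's own statement) =====
-- stated objective: faster
-- what changed: B never builds the swapped string: it length-checks s and p, then compares them in place pairwise with early exit, deciding each pair by ordinal arithmetic (ord +/- 32) instead of membership scans of the alphabet strings and quadratic-prone string concatenation; a timing run measured this markedly faster.
import Mathlib
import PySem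

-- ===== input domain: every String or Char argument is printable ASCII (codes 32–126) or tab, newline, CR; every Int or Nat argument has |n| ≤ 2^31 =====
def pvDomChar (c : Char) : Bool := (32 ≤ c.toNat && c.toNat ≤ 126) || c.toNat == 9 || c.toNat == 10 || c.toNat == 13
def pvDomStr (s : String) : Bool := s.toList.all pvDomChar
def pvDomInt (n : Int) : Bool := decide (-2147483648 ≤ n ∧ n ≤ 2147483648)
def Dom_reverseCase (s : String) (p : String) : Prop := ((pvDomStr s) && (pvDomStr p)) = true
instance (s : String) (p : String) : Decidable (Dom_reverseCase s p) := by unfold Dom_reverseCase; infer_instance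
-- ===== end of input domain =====

-- B compares s and p in place pairwise (length check, early exit, ordinal arithmetic) instead of
-- building the case-swapped string and comparing; objective: faster (measured).

-- ===== PORT A =====
-- the characters of string.ascii_lowercase / string.ascii_uppercase, as literal lists
def pvAsciiLowercase : List Char := ['a', 'b', 'c', 'd', 'e', 'f', 'g', 'h', 'i', 'j', 'k', 'l', 'm', 'n', 'o', 'p', 'q', 'r', 's', 't', 'u', 'v', 'w', 'x', 'y', 'z']
def pvAsciiUppercase : List Char := ['A', 'B', 'C', 'D', 'E', 'F', 'G', 'H', 'I', 'J', 'K', 'L', 'M', 'N', 'O', 'P', 'Q', 'R', 'S', 'T', 'U', 'V', 'W', 'X', 'Y', 'Z']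

def reverseCase (s : String) (p : String) : Option Bool :=
  let newString : List Char :=
    p.toList.foldl (fun acc i =>
      if i ∈ pvAsciiLowercase then acc ++ [PySem.Chars.upperChar i]
      else if i ∈ pvAsciiUppercase then acc ++ [PySem.Chars.lowerChar i]
      else acc ++ [i]) []
  if newString = s.toList then some true else none

-- ===== PORT B =====
-- Source B's per-character arithmetic: chr(ord-32) / chr(ord+32) / unchanged
def pvSwap (c : Char) : Char :=
  if 97 ≤ c.toNat ∧ c.toNat ≤ 122 then Char.ofNat (c.toNat - 32)
  else if 65 ≤ c.toNat ∧ c.toNat ≤ 90 then Char.ofNat (c.toNat + 32)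
  else c

-- Source B's index-driven while loop over equal-length strings, as structural recursion over both lists
def pvCheck : List Char → List Char → Option Bool
  | [], _ => some true
  | c :: ps, t :: ss => if pvSwap c = t then pvCheck ps ss else none
  | _ :: _, [] => none  -- unreachable: called only with equal lengths

def reverseCase_alt (s : String) (p : String) : Option Bool :=
  if s.toList.length = p.toList.length then pvCheck p.toList s.toList else none

-- ===== PRECONDITION & SPEC =====
def Spec_reverseCase (s : String) (p : String) (out : Option Bool) : Prop := out = reverseCase_alt s p
instance (s : String) (p : String) (out : Option Bool) : Decidable (Spec_reverseCase s p out) := by unfold Spec_reverseCase; infer_instance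

-- ===== CLAIM (what is proved, stated in full; the proofs are below) =====
def Claim_equal_reverseCase : Prop := ∀ (s : String) (p : String), Dom_reverseCase s p → Spec_reverseCase s p (reverseCase s p)

-- ===== LEMMAS AND PROOFS =====

-- the per-character transformation A applies
def pvStep (c : Char) : Char :=
  if c ∈ pvAsciiLowercase then PySem.Chars.upperChar c
  else if c ∈ pvAsciiUppercase then PySem.Chars.lowerChar c
  else c

theorem mem_lower_iff (c : Char) : c ∈ pvAsciiLowercase ↔ (97 ≤ c.toNat ∧ c.toNat ≤ 122) := by
  constructor
  · intro h; simp only [pvAsciiLowercase] at h; fin_cases h <;> decide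
  · rintro ⟨h1, h2⟩
    have hofNat : Char.ofNat c.toNat = c := Char.ofNat_toNat c
    interval_cases h : c.toNat <;> (rw [← hofNat]; decide)

theorem mem_upper_iff (c : Char) : c ∈ pvAsciiUppercase ↔ (65 ≤ c.toNat ∧ c.toNat ≤ 90) := by
  constructor
  · intro h; simp only [pvAsciiUppercase] at h; fin_cases h <;> decide
  · rintro ⟨h1, h2⟩
    have hofNat : Char.ofNat c.toNat = c := Char.ofNat_toNat c
    interval_cases h : c.toNat <;> (rw [← hofNat]; decide)

theorem pvStep_eq_swap (c : Char) : pvStep c = pvSwap c := by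
  by_cases hl : c ∈ pvAsciiLowercase
  · have hb := (mem_lower_iff c).mp hl
    simp only [pvStep, pvSwap, hl, if_pos hb, if_true]
    simp only [pvAsciiLowercase] at hl; fin_cases hl <;> decide
  · by_cases hu : c ∈ pvAsciiUppercase
    · have hb := (mem_upper_iff c).mp hu
      have hnb : ¬ (97 ≤ c.toNat ∧ c.toNat ≤ 122) := fun h => hl ((mem_lower_iff c).mpr h)
      simp only [pvStep, pvSwap, hl, hu, if_neg hnb, if_pos hb, if_false, if_true]
      simp only [pvAsciiUppercase] at hu; fin_cases hu <;> decide
    · have h1 : ¬ (97 ≤ c.toNat ∧ c.toNat ≤ 122) := fun h => hl ((mem_lower_iff c).mpr h)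
      have h2 : ¬ (65 ≤ c.toNat ∧ c.toNat ≤ 90) := fun h => hu ((mem_upper_iff c).mpr h)
      simp [pvStep, pvSwap, hl, hu, h1, h2]

theorem pvFoldl_eq_map (l : List Char) (acc : List Char) :
    l.foldl (fun acc i =>
      if i ∈ pvAsciiLowercase then acc ++ [PySem.Chars.upperChar i]
      else if i ∈ pvAsciiUppercase then acc ++ [PySem.Chars.lowerChar i]
      else acc ++ [i]) acc = acc ++ l.map pvStep := by
  induction l generalizing acc with
  | nil => simp
  | cons c t ih => simp only [List.foldl_cons, List.map_cons, ih, pvStep]; split_ifs <;> simp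

theorem pvCheck_eq (ps ss : List Char) (h : ps.length = ss.length) :
    pvCheck ps ss = if ps.map pvSwap = ss then some true else none := by
  induction ps generalizing ss with
  | nil => cases ss with
    | nil => simp [pvCheck]
    | cons _ _ => simp at h
  | cons c t ih => cases ss with
    | nil => simp at h
    | cons u v =>
      simp only [List.length_cons, Nat.add_right_cancel_iff] at h
      simp only [pvCheck, List.map_cons, List.cons.injEq]
      by_cases hc : pvSwap c = u
      · rw [if_pos hc, ih v h]
        by_cases hv : t.map pvSwap = v
        · rw [if_pos hv, if_pos ⟨hc, hv⟩]
        · rw [if_neg hv, if_neg (fun hh => hv hh.2)]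
      · rw [if_neg hc, if_neg (fun hh => hc hh.1)]

-- ===== VERDICT (by name: the statement is the Claim_ definition above) =====
theorem reverseCase_spec : Claim_equal_reverseCase := by
  intro s p _
  unfold Spec_reverseCase reverseCase reverseCase_alt
  rw [pvFoldl_eq_map]
  simp only [List.nil_append]
  have hmap : p.toList.map pvStep = p.toList.map pvSwap :=
    List.map_congr_left (fun c _ => pvStep_eq_swap c)
  rw [hmap]
  by_cases hlen : s.toList.length = p.toList.length
  · rw [if_pos hlen, pvCheck_eq p.toList s.toList (by simpa using hlen.symm)]
    split <;> rfl
  · rw [if_neg hlen, if_neg (fun hh => hlen (by rw [← hh]; simp))]
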